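-- pv_equiv track=rewrite | github.com/KiranKK1111/genai-agnostic-be | app/services/token_budget.py | build_context_budget
-- ===== SOURCE A (Python) =====
-- CHARS_PER_TOKEN = 4
--
-- def estimate_tokens(text: str) -> int:
--     """Estimate token count for a text string."""
--     if not text:
--         return 0
--     return len(text) // CHARS_PER_TOKEN
--
-- def truncate_to_budget(text: str, max_tokens: int) -> str:
--     """Truncate text to fit within a token budget."""
--     max_chars = max_tokens * CHARS_PER_TOKEN
--     if len(text) <= max_chars:
--         return text
--     return text[:max_chars] + "..."
--
-- def build_context_budget(system: str, history: list[dict], user_msg: str,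
--                          max_context: int = 6000) -> list[dict]:
--     """Build conversation messages that fit within the token budget."""
--     system_tokens = estimate_tokens(system)
--     user_tokens = estimate_tokens(user_msg)
--     remaining = max_context - system_tokens - user_tokens - 200  # 200 token buffer
--
--     if remaining <= 0:
--         return [{"role": "user", "content": truncate_to_budget(user_msg, max_context - system_tokens - 100)}]
--
--     # Add history from most recent, working backwards
--     messages = []
--     for turn in reversed(history):
--         turn_tokens = estimate_tokens(turn.get("content", ""))
--         if remaining - turn_tokens < 0:
--             break
--         messages.insert(0, turn)
--         remaining -= turn_tokens
--
--     messages.append({"role": "user", "content": user_msg})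
--     return messages
-- ===== SOURCE B (Python) =====
-- CHARS_PER_TOKEN = 4
--
-- def estimate_tokens(text: str) -> int:
--     if not text:
--         return 0
--     return len(text) // CHARS_PER_TOKEN
--
-- def truncate_to_budget(text: str, max_tokens: int) -> str:
--     max_chars = max_tokens * CHARS_PER_TOKEN
--     if len(text) <= max_chars:
--         return text
--     return text[:max_chars] + "..."
--
-- def build_context_budget(system: str, history: list[dict], user_msg: str,
--                          max_context: int = 6000) -> list[dict]:
--     system_tokens = estimate_tokens(system)
--     user_tokens = estimate_tokens(user_msg)
--     remaining = max_context - system_tokens - user_tokens - 200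
--
--     if remaining <= 0:
--         return [{"role": "user", "content": truncate_to_budget(user_msg, max_context - system_tokens - 100)}]
--
--     # Table of per-turn estimates, then cumulative sums from most recent backward.
--     costs = [estimate_tokens(turn.get("content", "")) for turn in history]
--     cums = []
--     total = 0
--     for c in reversed(costs):
--         total += c
--         cums.append(total)
--     # Cumulative sums are monotone (costs >= 0), so the number of them that fit
--     # equals the break point of a backward scan.
--     n = sum(1 for t in cums if t <= remaining)
--     return history[len(history) - n:] + [{"role": "user", "content": user_msg}]
-- ===== Notes on version B (the rewrite author's own statement) =====
-- stated objective: alternative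
-- what changed: Replaces A's backward insert(0)/break loop with a per-turn estimate table plus cumulative sums walking from the most recent turn; the cutoff n is the count of cumulative sums that fit the remaining budget (valid since estimates are nonnegative) and the result is the slice history[len-n:] plus the user message.
import Mathlib
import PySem

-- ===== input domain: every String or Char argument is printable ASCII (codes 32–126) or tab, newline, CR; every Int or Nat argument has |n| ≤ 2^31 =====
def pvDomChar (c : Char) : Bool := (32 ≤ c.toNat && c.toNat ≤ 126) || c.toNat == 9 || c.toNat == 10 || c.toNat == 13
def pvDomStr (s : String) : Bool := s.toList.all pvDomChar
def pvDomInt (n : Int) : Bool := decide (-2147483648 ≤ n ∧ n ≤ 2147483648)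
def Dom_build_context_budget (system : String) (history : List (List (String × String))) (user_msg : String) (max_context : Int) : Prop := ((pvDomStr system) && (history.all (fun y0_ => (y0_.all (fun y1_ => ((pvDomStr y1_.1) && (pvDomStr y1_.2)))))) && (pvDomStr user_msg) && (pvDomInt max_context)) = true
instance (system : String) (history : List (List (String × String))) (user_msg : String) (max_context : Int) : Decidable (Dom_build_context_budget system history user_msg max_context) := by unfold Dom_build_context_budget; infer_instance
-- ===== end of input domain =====

-- B replaces A's backward insert(0)/break loop by a per-turn estimate table plus
-- cumulative sums: the cutoff n is the count of cumulative sums ≤ remaining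
-- (valid since estimates are nonnegative), and the result is a slice of history.
-- Objective: alternative decomposition (same asymptotic cost).

-- ===== PORT A =====
-- estimate_tokens (shared module helper, identical in both Pythons)
def pvEst (s : String) : Int :=
  if s = "" then 0 else PySem.Int.floordiv (PySem.Str.len s) 4

-- truncate_to_budget (shared module helper, identical in both Pythons)
def pvTrunc (text : String) (max_tokens : Int) : String :=
  let max_chars := max_tokens * 4
  if PySem.Str.len text ≤ max_chars then text
  else PySem.Str.slice text none (some max_chars) ++ "..."

-- turn.get("content", "")
def pvGetContent (turn : List (String × String)) : String :=
  PySem.Dict.getD ⟨turn⟩ "content" ""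

-- A's backward loop: messages.insert(0, turn), break when remaining - turn_tokens < 0
def bccbLoopA : List (List (String × String)) → Int → List (List (String × String)) → List (List (String × String))
  | [], _, messages => messages
  | turn :: rest, remaining, messages =>
    let turn_tokens := pvEst (pvGetContent turn)
    if remaining - turn_tokens < 0 then messages
    else bccbLoopA rest (remaining - turn_tokens) (turn :: messages)

def build_context_budget (system : String) (history : List (List (String × String))) (user_msg : String) (max_context : Int) : List (List (String × String)) :=
  let system_tokens := pvEst system
  let user_tokens := pvEst user_msg
  let remaining := max_context - system_tokens - user_tokens - 200
  if remaining ≤ 0 then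
    [[("role", "user"), ("content", pvTrunc user_msg (max_context - system_tokens - 100))]]
  else
    bccbLoopA history.reverse remaining [] ++ [[("role", "user"), ("content", user_msg)]]

-- ===== PORT B =====
-- cumulative sums of a cost table, walking the (already reversed) list
def bccbCums : List Int → Int → List Int
  | [], _ => []
  | c :: rest, total => (total + c) :: bccbCums rest (total + c)

def build_context_budget_alt (system : String) (history : List (List (String × String))) (user_msg : String) (max_context : Int) : List (List (String × String)) :=
  let system_tokens := pvEst system
  let user_tokens := pvEst user_msg
  let remaining := max_context - system_tokens - user_tokens - 200
  if remaining ≤ 0 then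
    [[("role", "user"), ("content", pvTrunc user_msg (max_context - system_tokens - 100))]]
  else
    let costs := history.map (fun turn => pvEst (pvGetContent turn))
    let cums := bccbCums costs.reverse 0
    let n := (cums.filter (fun t => decide (t ≤ remaining))).length
    history.drop (history.length - n) ++ [[("role", "user"), ("content", user_msg)]]

-- ===== PRECONDITION & SPEC =====
def Spec_build_context_budget (system : String) (history : List (List (String × String))) (user_msg : String) (max_context : Int) (out : List (List (String × String))) : Prop := out = build_context_budget_alt system history user_msg max_context
instance (system : String) (history : List (List (String × String))) (user_msg : String) (max_context : Int) (out : List (List (String × String))) : Decidable (Spec_build_context_budget system history user_msg max_context out) := by unfold Spec_build_context_budget; infer_instance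

-- ===== CLAIM (what is proved, stated in full; the proofs are below) =====
def Claim_equal_build_context_budget : Prop := ∀ (system : String) (history : List (List (String × String))) (user_msg : String) (max_context : Int), Dom_build_context_budget system history user_msg max_context → Spec_build_context_budget system history user_msg max_context (build_context_budget system history user_msg max_context)

-- ===== LEMMAS AND PROOFS =====

-- the break point of A's loop, as a count
def bccbCnt : List Int → Int → Nat
  | [], _ => 0
  | c :: rest, r => if r - c < 0 then 0 else bccbCnt rest (r - c) + 1

theorem pvEst_nonneg (s : String) : 0 ≤ pvEst s := by
  unfold pvEst
  split
  · exact le_refl 0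
  · rw [PySem.Int.floordiv_eq_ediv_of_pos (by omega)]
    have : (0:Int) ≤ PySem.Str.len s := by
      simp [PySem.Str.len_eq]
    omega

theorem bccbLoopA_eq_take (l : List (List (String × String))) :
    ∀ (r : Int) (acc : List (List (String × String))),
      bccbLoopA l r acc
        = (l.take (bccbCnt (l.map (fun t => pvEst (pvGetContent t))) r)).reverse ++ acc := by
  induction l with
  | nil => intro r acc; simp [bccbLoopA, bccbCnt]
  | cons t rest ih =>
    intro r acc
    simp only [bccbLoopA, List.map_cons, bccbCnt]
    by_cases h : r - pvEst (pvGetContent t) < 0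
    · simp [h]
    · simp only [h, if_false]
      rw [ih]
      simp

theorem bccbCums_shift (cs : List Int) : ∀ (s t : Int),
    bccbCums cs (s + t) = (bccbCums cs t).map (s + ·) := by
  induction cs with
  | nil => intro s t; simp [bccbCums]
  | cons c rest ih =>
    intro s t
    simp only [bccbCums, List.map_cons]
    have h : s + t + c = s + (t + c) := by ring
    rw [h, ih s (t + c)]

theorem bccbCums_ge (cs : List Int) (hcs : ∀ c ∈ cs, 0 ≤ c) :
    ∀ (t : Int), ∀ x ∈ bccbCums cs t, t ≤ x := by
  induction cs with
  | nil => intro t x hx; simp [bccbCums] at hx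
  | cons c rest ih =>
    intro t x hx
    have hc : 0 ≤ c := hcs c (by simp)
    simp only [bccbCums, List.mem_cons] at hx
    rcases hx with h | h
    · omega
    · have := ih (fun d hd => hcs d (by simp [hd])) (t + c) x h
      omega

theorem bccbCnt_eq_countP (cs : List Int) (hcs : ∀ c ∈ cs, 0 ≤ c) :
    ∀ (r : Int), bccbCnt cs r = (bccbCums cs 0).countP (fun t => decide (t ≤ r)) := by
  induction cs with
  | nil => intro r; simp [bccbCnt, bccbCums]
  | cons c rest ih =>
    intro r
    have hc : 0 ≤ c := hcs c (by simp)
    have hrest : ∀ d ∈ rest, 0 ≤ d := fun d hd => hcs d (by simp [hd])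
    simp only [bccbCnt, bccbCums, zero_add]
    by_cases h : r - c < 0
    · simp only [h, if_true]
      rw [List.countP_cons]
      have h1 : (decide (c ≤ r) : Bool) = false := by
        rw [decide_eq_false_iff_not]; omega
      have h2 : (bccbCums rest c).countP (fun t => decide (t ≤ r)) = 0 := by
        rw [List.countP_eq_zero]
        intro x hx
        have := bccbCums_ge rest hrest c x hx
        simp only [decide_eq_true_eq]; omega
      simp [h1, h2]
    · simp only [h, if_false]
      rw [List.countP_cons]
      have h1 : (decide (c ≤ r) : Bool) = true := by
        rw [decide_eq_true_eq]; omega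
      have h2 : bccbCums rest c = (bccbCums rest 0).map (c + ·) := by
        have := bccbCums_shift rest c 0
        simpa using this
      rw [h2, List.countP_map]
      have h3 : ((fun t => decide (t ≤ r)) ∘ (c + ·)) = (fun t => decide (t ≤ r - c)) := by
        funext x
        simp only [Function.comp_apply]
        rw [Bool.eq_iff_iff, decide_eq_true_eq, decide_eq_true_eq]
        omega
      rw [h3, ih hrest (r - c), h1]
      simp

-- ===== VERDICT (by name: the statement is the Claim_ definition above) =====
theorem build_context_budget_spec : Claim_equal_build_context_budget := by
  intro system history user_msg max_context _
  unfold Spec_build_context_budget build_context_budget build_context_budget_alt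
  by_cases h : max_context - pvEst system - pvEst user_msg - 200 ≤ 0
  · simp only [if_pos h]
  · simp only [if_neg h]
    congr 1
    rw [bccbLoopA_eq_take, List.append_nil, List.map_reverse]
    have hnn : ∀ c ∈ (history.map (fun t => pvEst (pvGetContent t))).reverse, 0 ≤ c := by
      intro c hc
      rw [List.mem_reverse, List.mem_map] at hc
      obtain ⟨t, _, ht⟩ := hc
      rw [← ht]; exact pvEst_nonneg _
    rw [bccbCnt_eq_countP _ hnn, List.countP_eq_length_filter,
        List.take_reverse, List.reverse_reverse]
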